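-- pv_equiv track=rewrite | github.com/ERTML/Critical_Slowing_Down | annual_mean.py | generate_month_list
-- ===== SOURCE A (Python) =====
-- def generate_month_list(start_year, start_month, band_count):
--     ym_list = []
--     year, month = start_year, start_month
--     for _ in range(band_count):
--         ym_list.append(f"{year}{month:02d}")
--         month += 1
--         if month > 12:
--             month = 1
--             year += 1
--     return ym_list
-- ===== SOURCE B (Python) =====
-- def generate_month_list(start_year, start_month, band_count):
--     base = start_year * 12 + start_month - 1
--     return [f"{(base + i) // 12}{(base + i) % 12 + 1:02d}"
--             for i in range(band_count)]
-- ===== Notes on version B (the rewrite author's own statement) =====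
-- stated objective: alternative
-- what changed: B replaces A's stateful (year, month) loop with its rollover branch by a single comprehension computing each label in closed form from an absolute month counter via floor division and modulo; Pre_ restricts start_month to the calendar months 1..12 whenever any label is requested, since on malformed months A emits non-normalized labels (e.g. '113') while B emits normalized ones and neither is specified.
-- outside the precondition, e.g. on generate_month_list(1, 13, 1): A returns ['113'], B returns ['201']; on generate_month_list(2023, 0, 2): A returns ['202300', '202301'], B returns ['202212', '202301']
import Mathlib
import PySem

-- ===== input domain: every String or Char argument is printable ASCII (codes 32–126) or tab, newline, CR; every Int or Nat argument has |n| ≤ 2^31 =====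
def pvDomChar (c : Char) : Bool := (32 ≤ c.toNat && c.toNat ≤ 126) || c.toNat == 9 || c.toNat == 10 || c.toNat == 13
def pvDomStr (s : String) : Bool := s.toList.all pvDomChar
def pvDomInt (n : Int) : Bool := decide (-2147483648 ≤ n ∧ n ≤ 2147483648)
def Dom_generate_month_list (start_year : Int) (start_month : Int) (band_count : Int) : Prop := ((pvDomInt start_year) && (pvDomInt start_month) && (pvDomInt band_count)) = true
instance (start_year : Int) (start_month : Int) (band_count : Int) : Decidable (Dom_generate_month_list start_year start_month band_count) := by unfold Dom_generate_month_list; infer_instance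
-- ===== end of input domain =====

-- B computes each label in closed form from an absolute month counter (floor-div / mod)
-- instead of A's stateful (year, month) loop with a rollover branch (objective: alternative).

-- shared helper: Python's f"{n:02d}" (zero-pads exactly the one-character results 0..9)
def pad02 (n : Int) : String :=
  if 0 ≤ n ∧ n ≤ 9 then "0" ++ PySem.Int.toStr n else PySem.Int.toStr n

-- ===== PORT A =====
def gmlLoopA : Nat → Int → Int → List String → List String
  | 0, _, _, acc => acc.reverse
  | k+1, year, month, acc =>
      let acc' := (PySem.Int.toStr year ++ pad02 month) :: acc
      let month' := month + 1
      if month' > 12 then gmlLoopA k (year + 1) 1 acc'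
      else gmlLoopA k year month' acc'

def generate_month_list (start_year : Int) (start_month : Int) (band_count : Int) : List String :=
  gmlLoopA band_count.toNat start_year start_month []

-- ===== PORT B =====
def generate_month_list_alt (start_year : Int) (start_month : Int) (band_count : Int) : List String :=
  let base := start_year * 12 + start_month - 1
  (PySem.List.pyRange 0 band_count 1).map (fun i =>
    PySem.Int.toStr (PySem.Int.floordiv (base + i) 12) ++ pad02 (PySem.Int.mod (base + i) 12 + 1))

-- ===== PRECONDITION & SPEC =====
-- Pre_ restricts start_month to the calendar months 1..12 (the function's natural
-- domain) whenever any label is requested: on malformed start_month A emits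
-- non-normalized labels like "113" for (1, 13, 1) while B emits normalized calendar
-- labels, and neither behaviour is specified for an invalid month.
def Pre_generate_month_list (start_year : Int) (start_month : Int) (band_count : Int) : Prop :=
  (1 ≤ start_month ∧ start_month ≤ 12) ∨ band_count < 1
instance (start_year : Int) (start_month : Int) (band_count : Int) : Decidable (Pre_generate_month_list start_year start_month band_count) := by unfold Pre_generate_month_list; infer_instance

def pvWitness_generate_month_list : Int × Int × Int := (2023, 5, 3)

def Spec_generate_month_list (start_year : Int) (start_month : Int) (band_count : Int) (out : List String) : Prop := out = generate_month_list_alt start_year start_month band_count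
instance (start_year : Int) (start_month : Int) (band_count : Int) (out : List String) : Decidable (Spec_generate_month_list start_year start_month band_count out) := by unfold Spec_generate_month_list; infer_instance

-- ===== CLAIM (what is proved, stated in full; the proofs are below) =====
def Claim_equal_generate_month_list : Prop := ∀ (start_year : Int) (start_month : Int) (band_count : Int), Dom_generate_month_list start_year start_month band_count → Pre_generate_month_list start_year start_month band_count → Spec_generate_month_list start_year start_month band_count (generate_month_list start_year start_month band_count)

-- ===== LEMMAS AND PROOFS =====

-- the label B emits for absolute month counter t
def gmlEntry (t : Int) : String :=
  PySem.Int.toStr (PySem.Int.floordiv t 12) ++ pad02 (PySem.Int.mod t 12 + 1)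

-- n consecutive divmod labels starting at counter t
def gmlBuild : Nat → Int → List String
  | 0, _ => []
  | k+1, t => gmlEntry t :: gmlBuild k (t + 1)

theorem gml_entry_eq (y m : Int) (h1 : 1 ≤ m) (h2 : m ≤ 12) :
    gmlEntry (y * 12 + (m - 1)) = PySem.Int.toStr y ++ pad02 m := by
  unfold gmlEntry
  rw [PySem.Int.floordiv_eq_ediv_of_pos (by omega : (0:Int) < 12),
      PySem.Int.mod_eq_emod_of_pos (by omega : (0:Int) < 12)]
  rw [show (y * 12 + (m - 1)) / 12 = y by omega,
      show (y * 12 + (m - 1)) % 12 + 1 = m by omega]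

-- A's loop from a canonical month 1..12 is pure divmod labels
theorem gmlLoopA_eq_build (k : Nat) : ∀ (y m : Int) (acc : List String),
    1 ≤ m → m ≤ 12 →
    gmlLoopA k y m acc = acc.reverse ++ gmlBuild k (y * 12 + (m - 1)) := by
  induction k with
  | zero => intro y m acc _ _; simp [gmlLoopA, gmlBuild]
  | succ k ih =>
    intro y m acc h1 h2
    show (if m + 1 > 12 then _ else _) = _
    by_cases h : m + 1 > 12
    · have hm : m = 12 := by omega
      rw [if_pos h, ih (y + 1) 1 _ (by omega) (by omega)]
      simp only [gmlBuild, List.reverse_cons, List.append_assoc, List.cons_append,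
        List.nil_append]
      rw [show (y + 1) * 12 + (1 - 1) = (y * 12 + (m - 1)) + 1 by omega,
          ← gml_entry_eq y m h1 h2]
    · rw [if_neg h, ih y (m + 1) _ (by omega) (by omega)]
      simp only [gmlBuild, List.reverse_cons, List.append_assoc, List.cons_append,
        List.nil_append]
      rw [show y * 12 + (m + 1 - 1) = (y * 12 + (m - 1)) + 1 by ring,
          ← gml_entry_eq y m h1 h2]

-- B's comprehension over range(band_count) is gmlBuild
theorem map_pyRange_build (base : Int) (n : Nat) : ∀ (a : Int),
    (PySem.List.pyRange a (a + (n : Int)) 1).map (fun i => gmlEntry (base + i))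
      = gmlBuild n (base + a) := by
  induction n with
  | zero => intro a; rw [PySem.List.pyRange_one_eq_nil (by omega)]; simp [gmlBuild]
  | succ n ih =>
    intro a
    rw [PySem.List.pyRange_one_cons (by omega)]
    rw [show a + ((n + 1 : Nat) : Int) = (a + 1) + (n : Int) by push_cast; ring]
    simp only [List.map_cons, ih (a + 1), gmlBuild]
    rw [show base + (a + 1) = base + a + 1 by ring]

theorem alt_eq (sy sm bc : Int) :
    generate_month_list_alt sy sm bc = gmlBuild bc.toNat (sy * 12 + sm - 1) := by
  unfold generate_month_list_alt
  show (PySem.List.pyRange 0 bc 1).map (fun i =>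
      PySem.Int.toStr (PySem.Int.floordiv (sy * 12 + sm - 1 + i) 12)
        ++ pad02 (PySem.Int.mod (sy * 12 + sm - 1 + i) 12 + 1)) = _
  by_cases hbc : 0 ≤ bc
  · have h := map_pyRange_build (sy * 12 + sm - 1) bc.toNat 0
    rw [show (0 : Int) + ((bc.toNat : Nat) : Int) = bc by omega,
        show sy * 12 + sm - 1 + 0 = sy * 12 + sm - 1 by ring] at h
    simp only [gmlEntry] at h
    exact h
  · rw [PySem.List.pyRange_one_eq_nil (by omega),
        show bc.toNat = 0 by omega]
    simp [gmlBuild]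

-- ===== VERDICT (by name: the statement is the Claim_ definition above) =====
theorem generate_month_list_spec : Claim_equal_generate_month_list := by
  intro sy sm bc _ hpre
  unfold Spec_generate_month_list generate_month_list
  rw [alt_eq]
  by_cases hbc : bc < 1
  · rw [show bc.toNat = 0 by omega]; rfl
  · rcases hpre with ⟨h1, h2⟩ | h
    · rw [gmlLoopA_eq_build bc.toNat sy sm [] h1 h2]
      simp only [List.reverse_nil, List.nil_append]
      rw [show sy * 12 + (sm - 1) = sy * 12 + sm - 1 by ring]
    · omega
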